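-- pv_equiv track=rewrite | github.com/yeattinbalasy/PP2_Spring | lab3/func1.py | checkSpy
-- ===== SOURCE A (Python) =====
-- def checkSpy(li):
--     i = 0
--     while i != li.__len__() : #Yep, only while,no for
--         if li[i] == 0:
--             k = i
--             while k != li.__len__():
--                 if li[k] == 0:
--                     o = k
--
--                     while o != li.__len__():
--                         if li[o] == 7 :
--                             return True
--                         o+=1
--                 k+=1
--         i+=1
--     return False
-- ===== SOURCE B (Python) =====
-- def checkSpy(li):
--     seen_zero = False
--     for x in li:
--         if x == 0:
--             seen_zero = True
--         elif x == 7 and seen_zero: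
--             return True
--     return False
-- ===== Notes on version B (the rewrite author's own statement) =====
-- stated objective: faster
-- what changed: Replaced the three nested index-scanning while loops with a single pass carrying a seen-zero flag that returns on the first 7 after a 0.
import Mathlib
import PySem

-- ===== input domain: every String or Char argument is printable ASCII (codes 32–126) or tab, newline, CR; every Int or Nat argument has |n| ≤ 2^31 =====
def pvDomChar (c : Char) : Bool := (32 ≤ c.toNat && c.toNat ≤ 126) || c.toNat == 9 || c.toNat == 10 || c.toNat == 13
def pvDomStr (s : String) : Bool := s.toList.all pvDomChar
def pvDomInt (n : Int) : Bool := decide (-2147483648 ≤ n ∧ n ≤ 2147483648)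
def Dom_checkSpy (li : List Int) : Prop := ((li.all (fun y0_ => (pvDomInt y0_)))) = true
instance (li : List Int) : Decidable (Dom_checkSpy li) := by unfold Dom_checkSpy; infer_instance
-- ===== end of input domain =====

-- B replaces A's three nested while loops with one pass carrying a seen-zero flag; return value only, no side effects.

-- ===== PORT A =====
-- innermost loop: while o != len(li): if li[o] == 7: return True; o += 1
-- (indices only ever reach the range [start, len], so 'o < len' is the same exit as Python's 'o != len';
--  li.getD o 0 is exact for li[o] since o < len whenever it is read)
def checkSpyLoopO (li : List Int) (o : Nat) : Bool :=
  if _h : o < li.length then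
    if li.getD o 0 = 7 then true else checkSpyLoopO li (o + 1)
  else false
termination_by li.length - o

-- middle loop: while k != len(li): if li[k] == 0: o = k; <loop o>; k += 1
def checkSpyLoopK (li : List Int) (k : Nat) : Bool :=
  if _h : k < li.length then
    if li.getD k 0 = 0 then
      if checkSpyLoopO li k then true else checkSpyLoopK li (k + 1)
    else checkSpyLoopK li (k + 1)
  else false
termination_by li.length - k

-- outer loop: while i != len(li): if li[i] == 0: k = i; <loop k>; i += 1
def checkSpyLoopI (li : List Int) (i : Nat) : Bool :=
  if _h : i < li.length then
    if li.getD i 0 = 0 then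
      if checkSpyLoopK li i then true else checkSpyLoopI li (i + 1)
    else checkSpyLoopI li (i + 1)
  else false
termination_by li.length - i

def checkSpy (li : List Int) : Bool := checkSpyLoopI li 0

-- ===== PORT B =====
-- single pass with a seen-zero flag (for x in li: …)
def checkSpyAltLoop : List Int → Bool → Bool
  | [], _ => false
  | x :: xs, seen =>
    if x = 0 then checkSpyAltLoop xs true
    else if x = 7 && seen then true
    else checkSpyAltLoop xs seen

def checkSpy_alt (li : List Int) : Bool := checkSpyAltLoop li false

-- ===== PRECONDITION & SPEC =====
def Spec_checkSpy (li : List Int) (out : Bool) : Prop := out = checkSpy_alt li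
instance (li : List Int) (out : Bool) : Decidable (Spec_checkSpy li out) := by unfold Spec_checkSpy; infer_instance

-- ===== CLAIM (what is proved, stated in full; the proofs are below) =====
def Claim_equal_checkSpy : Prop := ∀ (li : List Int), Dom_checkSpy li → Spec_checkSpy li (checkSpy li)

-- ===== LEMMAS AND PROOFS =====

-- with the flag set, B's loop is just "is there a 7"
theorem altLoop_true (xs : List Int) : checkSpyAltLoop xs true = xs.any (fun x => x == 7) := by
  induction xs with
  | nil => simp [checkSpyAltLoop]
  | cons x xs ih =>
    simp only [checkSpyAltLoop, List.any_cons]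
    by_cases h0 : x = 0
    · subst h0; simp [ih]
    · by_cases h7 : x = 7 <;> simp [h0, h7, ih]

-- setting the flag can only make B's loop more likely to succeed
theorem altLoop_mono (xs : List Int) :
    checkSpyAltLoop xs false = true → checkSpyAltLoop xs true = true := by
  induction xs with
  | nil => simp [checkSpyAltLoop]
  | cons x xs ih =>
    simp only [checkSpyAltLoop]
    by_cases h0 : x = 0
    · simp [h0]
    · by_cases h7 : x = 7
      · simp [h0, h7]
      · simpa only [checkSpyAltLoop, if_neg h0, h7, Bool.and_false, Bool.and_true,
          decide_eq_true_eq, if_false, if_neg (by simp : ¬ (false = true))] using ih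

theorem drop_cons_of_lt (li : List Int) (n : Nat) (h : n < li.length) :
    li.drop n = li.getD n 0 :: li.drop (n + 1) := by
  rw [List.getD_eq_getElem li 0 h, List.drop_eq_getElem_cons h]

theorem loopO_eq (li : List Int) (o : Nat) :
    checkSpyLoopO li o = (li.drop o).any (fun x => x == 7) := by
  by_cases h : o < li.length
  · rw [checkSpyLoopO, dif_pos h, drop_cons_of_lt li o h]
    generalize hg : li.getD o 0 = a
    simp only [List.any_cons, loopO_eq li (o + 1)]
    by_cases h7 : a = 7 <;> simp [h7]
  · rw [checkSpyLoopO, dif_neg h, List.drop_eq_nil_of_le (by omega)]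
    simp
termination_by li.length - o

theorem loopK_eq (li : List Int) (k : Nat) :
    checkSpyLoopK li k = checkSpyAltLoop (li.drop k) false := by
  by_cases h : k < li.length
  · rw [checkSpyLoopK, dif_pos h]
    have ih := loopK_eq li (k + 1)
    by_cases h0 : li.getD k 0 = 0
    · rw [if_pos h0, loopO_eq li k, drop_cons_of_lt li k h]
      simp only [checkSpyAltLoop, if_pos h0, altLoop_true, List.any_cons, h0]
      by_cases h7 : (li.drop (k + 1)).any (fun x => x == 7) = true
      · simp [h7]
      · simp only [Bool.not_eq_true] at h7
        have hb : checkSpyAltLoop (li.drop (k + 1)) false = false := by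
          cases hc : checkSpyAltLoop (li.drop (k + 1)) false
          · rfl
          · have := altLoop_mono _ hc
            rw [altLoop_true] at this
            simp [h7] at this
        simp [ih, hb, h7, h0]
    · rw [if_neg h0, drop_cons_of_lt li k h]
      simp only [checkSpyAltLoop, if_neg h0, Bool.and_false, if_neg (by simp : ¬ False = True)]
      simpa using ih
  · rw [checkSpyLoopK, dif_neg h, List.drop_eq_nil_of_le (by omega)]
    rfl
termination_by li.length - k

-- loop I has the same recursion as loop K, with loop K in place of loop O
theorem loopI_eq (li : List Int) (i : Nat) :
    checkSpyLoopI li i = checkSpyAltLoop (li.drop i) false := by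
  by_cases h : i < li.length
  · rw [checkSpyLoopI, dif_pos h]
    have ih := loopI_eq li (i + 1)
    by_cases h0 : li.getD i 0 = 0
    · rw [if_pos h0, loopK_eq li i]
      cases hb : checkSpyAltLoop (li.drop i) false
      · rw [if_neg (by simp), ih]
        rw [drop_cons_of_lt li i h] at hb
        simp only [checkSpyAltLoop, if_pos h0] at hb
        cases hc : checkSpyAltLoop (li.drop (i + 1)) false
        · rfl
        · have := altLoop_mono _ hc
          simp [this] at hb
      · simp
    · rw [if_neg h0, ih, drop_cons_of_lt li i h]
      simp only [checkSpyAltLoop, if_neg h0, Bool.and_false, if_neg (by simp : ¬ False = True)]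
      simp
  · rw [checkSpyLoopI, dif_neg h, List.drop_eq_nil_of_le (by omega)]
    rfl
termination_by li.length - i

-- ===== VERDICT =====
theorem checkSpy_spec : Claim_equal_checkSpy := by
  intro li _
  unfold Spec_checkSpy checkSpy checkSpy_alt
  simpa using loopI_eq li 0
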